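-- pv_equiv track=rewrite | github.com/Nimdy/jarvis-oracle-edition | brain/conversation_handler.py | _derive_personal_memory_metadata
-- ===== SOURCE A (Python) =====
-- def _derive_personal_memory_metadata(payload: str, category: str) -> tuple[str, list[str]]:
--     """Normalize payloads and attach structured tags for durable personal facts."""
--     cleaned = " ".join(str(payload).strip().split()).rstrip(".,!?;: ")
--     if not cleaned:
--         return "", []
--
--     lower = cleaned.lower()
--     tags = ["schema:personal_memory_v2"]
--
--     if category == "personal_fact":
--         if "birthday is" in lower:
--             tags.extend(["fact_kind:birthday", "high_confidence_fact"])
--         elif "wants to be called" in lower: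
--             tags.extend(["fact_kind:preferred_name", "high_confidence_fact"])
--         elif "name is" in lower:
--             tags.extend(["fact_kind:name", "high_confidence_fact"])
--         elif "partner is" in lower:
--             tags.append("fact_kind:relationship_role")
--         elif lower.startswith("user lives in "):
--             tags.append("fact_kind:location")
--         elif lower.startswith("user is from "):
--             tags.append("fact_kind:origin")
--         elif lower.startswith("user is "):
--             tags.append("fact_kind:biographical")
--     elif category == "personal_preference":
--         tags.append("preference_kind:stable")
--         if "favorite " in lower:
--             tags.append("preference_kind:favorite")
--     elif category == "response_style":
--         tags.extend(["preference_kind:response_style", "high_confidence_fact"])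
--     elif category == "personal_interest":
--         tags.append("interest_kind:positive")
--     elif category == "personal_dislike":
--         tags.append("interest_kind:negative")
--     elif category == "personal_habit":
--         tags.append("fact_kind:habit")
--     elif category == "routine_priority":
--         tags.extend(["routine", "schedule", "daily", "preference_kind:routine_priority"])
--         if any(term in lower for term in ("priority", "priorities", "focused on", "current focus")):
--             tags.append("priority")
--         if "interrupt" in lower:
--             tags.append("interrupt_preference")
--         if any(term in lower for term in ("available", "unavailable", "busy", "focus-window")):
--             tags.append("availability")
--     elif category == "thirdparty_fact":
--         tags.append("subject_kind:thirdparty")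
--         if "birthday is" in lower:
--             tags.extend(["fact_kind:thirdparty_birthday", "high_confidence_fact"])
--         elif "name is" in lower:
--             tags.extend(["fact_kind:thirdparty_name", "high_confidence_fact"])
--         else:
--             tags.append("fact_kind:thirdparty_biographical")
--     elif category == "thirdparty_preference":
--         tags.extend(["subject_kind:thirdparty", "preference_kind:thirdparty"])
--     elif category == "former_interest":
--         tags.append("interest_kind:retired")
--
--     return cleaned, tags
-- ===== SOURCE B (Python) =====
-- # Data-driven re-implementation: one dispatch table (category -> base tags, mode,
-- # ordered rules, default tags) driven by a tiny rule interpreter.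
-- # Matchers: ("in", s) = substring of lower, ("prefix", s) = lower.startswith(s).
-- # mode "first" stops after the first matching rule; "all" applies every rule.
-- # default tags are added when no rule matched.
-- _TABLE = {
--     "personal_fact": ([], "first", [
--         ([("in", "birthday is")], ["fact_kind:birthday", "high_confidence_fact"]),
--         ([("in", "wants to be called")], ["fact_kind:preferred_name", "high_confidence_fact"]),
--         ([("in", "name is")], ["fact_kind:name", "high_confidence_fact"]),
--         ([("in", "partner is")], ["fact_kind:relationship_role"]),
--         ([("prefix", "user lives in ")], ["fact_kind:location"]),
--         ([("prefix", "user is from ")], ["fact_kind:origin"]),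
--         ([("prefix", "user is ")], ["fact_kind:biographical"]),
--     ], []),
--     "personal_preference": (["preference_kind:stable"], "all", [
--         ([("in", "favorite ")], ["preference_kind:favorite"]),
--     ], []),
--     "response_style": (["preference_kind:response_style", "high_confidence_fact"], "all", [], []),
--     "personal_interest": (["interest_kind:positive"], "all", [], []),
--     "personal_dislike": (["interest_kind:negative"], "all", [], []),
--     "personal_habit": (["fact_kind:habit"], "all", [], []),
--     "routine_priority": (["routine", "schedule", "daily", "preference_kind:routine_priority"], "all", [
--         ([("in", "priority"), ("in", "priorities"), ("in", "focused on"), ("in", "current focus")], ["priority"]),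
--         ([("in", "interrupt")], ["interrupt_preference"]),
--         ([("in", "available"), ("in", "unavailable"), ("in", "busy"), ("in", "focus-window")], ["availability"]),
--     ], []),
--     "thirdparty_fact": (["subject_kind:thirdparty"], "first", [
--         ([("in", "birthday is")], ["fact_kind:thirdparty_birthday", "high_confidence_fact"]),
--         ([("in", "name is")], ["fact_kind:thirdparty_name", "high_confidence_fact"]),
--     ], ["fact_kind:thirdparty_biographical"]),
--     "thirdparty_preference": (["subject_kind:thirdparty", "preference_kind:thirdparty"], "all", [], []),
--     "former_interest": (["interest_kind:retired"], "all", [], []),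
-- }
--
--
-- def _derive_personal_memory_metadata(payload: str, category: str) -> tuple[str, list[str]]:
--     cleaned = " ".join(str(payload).strip().split()).rstrip(".,!?;: ")
--     if not cleaned:
--         return "", []
--     lower = cleaned.lower()
--     tags = ["schema:personal_memory_v2"]
--     entry = _TABLE.get(category)
--     if entry is None:
--         return cleaned, tags
--     base, mode, rules, default = entry
--     tags = tags + base
--     matched = False
--     for alts, add in rules:
--         if any(lower.startswith(p) if kind == "prefix" else p in lower for kind, p in alts):
--             tags = tags + add
--             matched = True
--             if mode == "first":
--                 break
--     if not matched:
--         tags = tags + default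
--     return cleaned, tags
-- ===== Notes on version B (the rewrite author's own statement) =====
-- stated objective: alternative
-- what changed: Replaces A's hard-coded if/elif chain over categories and keyword tests by a declarative dispatch table (category -> base tags, match mode, ordered matcher rules, default tags) driven by a small generic rule interpreter that honors first-match-stop vs apply-all and the no-match default.
import Mathlib
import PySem

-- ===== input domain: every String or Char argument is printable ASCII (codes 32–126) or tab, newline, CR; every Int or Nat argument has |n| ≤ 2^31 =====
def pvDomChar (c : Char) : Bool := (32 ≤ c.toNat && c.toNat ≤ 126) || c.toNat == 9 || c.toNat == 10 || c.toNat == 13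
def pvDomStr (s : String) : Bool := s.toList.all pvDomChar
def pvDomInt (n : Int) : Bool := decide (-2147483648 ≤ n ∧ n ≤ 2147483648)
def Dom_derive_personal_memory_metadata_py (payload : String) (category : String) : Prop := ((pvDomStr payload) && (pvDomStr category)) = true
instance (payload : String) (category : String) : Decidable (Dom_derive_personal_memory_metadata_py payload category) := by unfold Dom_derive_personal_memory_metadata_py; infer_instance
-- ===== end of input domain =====

-- B replaces A's if/elif chain by a dispatch table (category → base tags, mode, rules,
-- default tags) driven by a small rule interpreter; objective: idiomatic/alternative, same cost.

-- shared helper: both Pythons contain the identical normalization line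
-- ' '.join(str(payload).strip().split()).rstrip(".,!?;: "); the rstrip-with-chars
-- is ported by hand (drop trailing chars of the set from the end — exact for rstrip(chars)).
def pvClean (payload : String) : String :=
  let joined := PySem.Str.join " " (PySem.Str.split₀ (PySem.Str.strip payload))
  String.ofList ((joined.toList.reverse.dropWhile (fun c => (".,!?;: ".toList).contains c)).reverse)

-- ===== PORT A =====
def derive_personal_memory_metadata_py (payload : String) (category : String) : String × List String :=
  let cleaned := pvClean payload
  if cleaned == "" then ("", [])
  else
    let lower := PySem.Str.lower cleaned
    let tags := ["schema:personal_memory_v2"]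
    let tags :=
      if category == "personal_fact" then
        if PySem.Str.isIn "birthday is" lower then tags ++ ["fact_kind:birthday", "high_confidence_fact"]
        else if PySem.Str.isIn "wants to be called" lower then tags ++ ["fact_kind:preferred_name", "high_confidence_fact"]
        else if PySem.Str.isIn "name is" lower then tags ++ ["fact_kind:name", "high_confidence_fact"]
        else if PySem.Str.isIn "partner is" lower then tags ++ ["fact_kind:relationship_role"]
        else if PySem.Str.startswith lower "user lives in " then tags ++ ["fact_kind:location"]
        else if PySem.Str.startswith lower "user is from " then tags ++ ["fact_kind:origin"]
        else if PySem.Str.startswith lower "user is " then tags ++ ["fact_kind:biographical"]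
        else tags
      else if category == "personal_preference" then
        let t := tags ++ ["preference_kind:stable"]
        if PySem.Str.isIn "favorite " lower then t ++ ["preference_kind:favorite"] else t
      else if category == "response_style" then tags ++ ["preference_kind:response_style", "high_confidence_fact"]
      else if category == "personal_interest" then tags ++ ["interest_kind:positive"]
      else if category == "personal_dislike" then tags ++ ["interest_kind:negative"]
      else if category == "personal_habit" then tags ++ ["fact_kind:habit"]
      else if category == "routine_priority" then
        let t := tags ++ ["routine", "schedule", "daily", "preference_kind:routine_priority"]
        let t := if ["priority", "priorities", "focused on", "current focus"].any (fun term => PySem.Str.isIn term lower) then t ++ ["priority"] else t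
        let t := if PySem.Str.isIn "interrupt" lower then t ++ ["interrupt_preference"] else t
        if ["available", "unavailable", "busy", "focus-window"].any (fun term => PySem.Str.isIn term lower) then t ++ ["availability"] else t
      else if category == "thirdparty_fact" then
        let t := tags ++ ["subject_kind:thirdparty"]
        if PySem.Str.isIn "birthday is" lower then t ++ ["fact_kind:thirdparty_birthday", "high_confidence_fact"]
        else if PySem.Str.isIn "name is" lower then t ++ ["fact_kind:thirdparty_name", "high_confidence_fact"]
        else t ++ ["fact_kind:thirdparty_biographical"]
      else if category == "thirdparty_preference" then tags ++ ["subject_kind:thirdparty", "preference_kind:thirdparty"]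
      else if category == "former_interest" then tags ++ ["interest_kind:retired"]
      else tags
    (cleaned, tags)

-- ===== PORT B =====
-- one matcher alternative: ("prefix", p) = lower.startswith(p), else substring test
def pvMatch (lower : String) (alt : String × String) : Bool :=
  if alt.1 == "prefix" then PySem.Str.startswith lower alt.2 else PySem.Str.isIn alt.2 lower

-- the rule loop of Source B: walk the rules, extending tags, tracking `matched`,
-- stopping after the first hit when mode = "first"
def pvRunRules (lower mode : String) :
    List (List (String × String) × List String) → List String → Bool → (List String × Bool)
  | [], tags, matched => (tags, matched)
  | (alts, add) :: rest, tags, matched =>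
      if alts.any (pvMatch lower) then
        if mode == "first" then (tags ++ add, true)
        else pvRunRules lower mode rest (tags ++ add) true
      else pvRunRules lower mode rest tags matched

-- the dispatch table _TABLE of Source B: category ↦ (base tags, mode, rules, default tags)
def pvTable : PySem.Dict String (List String × String × List (List (String × String) × List String) × List String) :=
  PySem.Dict.mk [
    ("personal_fact", ([], "first", [
        ([("in", "birthday is")], ["fact_kind:birthday", "high_confidence_fact"]),
        ([("in", "wants to be called")], ["fact_kind:preferred_name", "high_confidence_fact"]),
        ([("in", "name is")], ["fact_kind:name", "high_confidence_fact"]),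
        ([("in", "partner is")], ["fact_kind:relationship_role"]),
        ([("prefix", "user lives in ")], ["fact_kind:location"]),
        ([("prefix", "user is from ")], ["fact_kind:origin"]),
        ([("prefix", "user is ")], ["fact_kind:biographical"])], [])),
    ("personal_preference", (["preference_kind:stable"], "all", [
        ([("in", "favorite ")], ["preference_kind:favorite"])], [])),
    ("response_style", (["preference_kind:response_style", "high_confidence_fact"], "all", [], [])),
    ("personal_interest", (["interest_kind:positive"], "all", [], [])),
    ("personal_dislike", (["interest_kind:negative"], "all", [], [])),
    ("personal_habit", (["fact_kind:habit"], "all", [], [])),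
    ("routine_priority", (["routine", "schedule", "daily", "preference_kind:routine_priority"], "all", [
        ([("in", "priority"), ("in", "priorities"), ("in", "focused on"), ("in", "current focus")], ["priority"]),
        ([("in", "interrupt")], ["interrupt_preference"]),
        ([("in", "available"), ("in", "unavailable"), ("in", "busy"), ("in", "focus-window")], ["availability"])], [])),
    ("thirdparty_fact", (["subject_kind:thirdparty"], "first", [
        ([("in", "birthday is")], ["fact_kind:thirdparty_birthday", "high_confidence_fact"]),
        ([("in", "name is")], ["fact_kind:thirdparty_name", "high_confidence_fact"])],
        ["fact_kind:thirdparty_biographical"])),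
    ("thirdparty_preference", (["subject_kind:thirdparty", "preference_kind:thirdparty"], "all", [], [])),
    ("former_interest", (["interest_kind:retired"], "all", [], []))]

def derive_personal_memory_metadata_py_alt (payload : String) (category : String) : String × List String :=
  let cleaned := pvClean payload
  if cleaned == "" then ("", [])
  else
    let lower := PySem.Str.lower cleaned
    let tags := ["schema:personal_memory_v2"]
    match pvTable.get? category with
    | none => (cleaned, tags)
    | some (base, mode, rules, dflt) =>
        let r := pvRunRules lower mode rules (tags ++ base) false
        (cleaned, if r.2 then r.1 else r.1 ++ dflt)

-- ===== PRECONDITION & SPEC =====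
def Spec_derive_personal_memory_metadata_py (payload : String) (category : String) (out : String × List String) : Prop := out = derive_personal_memory_metadata_py_alt payload category
instance (payload : String) (category : String) (out : String × List String) : Decidable (Spec_derive_personal_memory_metadata_py payload category out) := by unfold Spec_derive_personal_memory_metadata_py; infer_instance

-- ===== CLAIM (what is proved, stated in full; the proofs are below) =====
def Claim_equal_derive_personal_memory_metadata_py : Prop := ∀ (payload : String) (category : String), Dom_derive_personal_memory_metadata_py payload category → Spec_derive_personal_memory_metadata_py payload category (derive_personal_memory_metadata_py payload category)

-- ===== LEMMAS AND PROOFS =====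
-- ===== VERDICT (by name: the statement is the Claim_ definition above) =====
theorem derive_personal_memory_metadata_py_spec : Claim_equal_derive_personal_memory_metadata_py := by
  intro payload category _
  unfold Spec_derive_personal_memory_metadata_py
  unfold derive_personal_memory_metadata_py derive_personal_memory_metadata_py_alt
  by_cases hc : pvClean payload == ""
  · simp [hc]
  · rw [Bool.not_eq_true] at hc
    simp only [hc, Bool.false_eq_true, if_false]
    by_cases h1 : category = "personal_fact"
    · subst h1
      simp only [pvTable]
      simp [PySem.Dict.get?_mk_cons, pvRunRules, pvMatch]
      try (split_ifs <;> simp_all)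
    by_cases h2 : category = "personal_preference"
    · subst h2
      simp only [pvTable]
      simp [PySem.Dict.get?_mk_cons, pvRunRules, pvMatch]
      try (split_ifs <;> simp_all)
    by_cases h3 : category = "response_style"
    · subst h3
      simp only [pvTable]
      simp [PySem.Dict.get?_mk_cons, pvRunRules]
    by_cases h4 : category = "personal_interest"
    · subst h4
      simp only [pvTable]
      simp [PySem.Dict.get?_mk_cons, pvRunRules]
    by_cases h5 : category = "personal_dislike"
    · subst h5
      simp only [pvTable]
      simp [PySem.Dict.get?_mk_cons, pvRunRules]
    by_cases h6 : category = "personal_habit"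
    · subst h6
      simp only [pvTable]
      simp [PySem.Dict.get?_mk_cons, pvRunRules]
    by_cases h7 : category = "routine_priority"
    · subst h7
      simp only [pvTable]
      simp [PySem.Dict.get?_mk_cons, pvRunRules, pvMatch]
      try (split_ifs <;> simp_all)
    by_cases h8 : category = "thirdparty_fact"
    · subst h8
      simp only [pvTable]
      simp [PySem.Dict.get?_mk_cons, pvRunRules, pvMatch]
      try (split_ifs <;> simp_all)
    by_cases h9 : category = "thirdparty_preference"
    · subst h9
      simp only [pvTable]
      simp [PySem.Dict.get?_mk_cons, pvRunRules]
    by_cases h10 : category = "former_interest"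
    · subst h10
      simp only [pvTable]
      simp [PySem.Dict.get?_mk_cons, pvRunRules]
    -- category not in the table: A's chain falls through, B's lookup misses
    simp only [pvTable]
    simp [Ne.symm h1, Ne.symm h2, Ne.symm h3, Ne.symm h4, Ne.symm h5,
          Ne.symm h6, Ne.symm h7, Ne.symm h8, Ne.symm h9, Ne.symm h10, h1, h2, h3, h4, h5, h6, h7, h8, h9, h10, PySem.Dict.get?]
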